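-- pv_equiv track=rewrite | github.com/tomharting/LOREM | LOREM.py | clean_predictions
-- ===== SOURCE A (Python) =====
-- def clean_predictions(predictions):
--     """
--     Clean-up the predicted labels by changing impossible combinations (f.e. 'R-S', 'R-E' should be 'R-B', 'R-E').
--
--     :param predictions: The predicted labels.
--     :return: The cleaned predicted labels.
--     """
--     relation_labels = ['R-B', 'R-E', 'R-I', 'R-S']
--     for line_index in range(0, len(predictions)):
--         sentence = predictions[line_index][0]
--         relation_started_flag = False
--         for label_index in range(0, len(sentence) - 1):
--             cur_label = sentence[label_index]
--             upcoming_relations_flag = False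
--
--             if cur_label in relation_labels:
--                 for upcoming_label in sentence[label_index + 1:]:
--                     if upcoming_label in relation_labels:
--                         upcoming_relations_flag = True
--
--                 if relation_started_flag:
--                     if upcoming_relations_flag:
--                         cur_label = u'R-I'
--                     else:
--                         cur_label = u'R-E'
--                 else:
--                     if upcoming_relations_flag:
--                         cur_label = u'R-B'
--                     else:
--                         cur_label = u'R-S'
--                     relation_started_flag = True
--
--             predictions[line_index][0][label_index] = cur_label
--
--     return predictions
-- ===== SOURCE B (Python) =====
-- def clean_predictions(predictions):
--     """Relabel relation-label runs per sentence in one backward + one forward pass instead of per-position suffix rescans.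
--     A mutates predictions in place and returns it; B builds a fresh list (return value is identical)."""
--     rel = {'R-B', 'R-E', 'R-I', 'R-S'}
--     out = []
--     for line in predictions:
--         sentence = line[0]
--         n = len(sentence)
--         # backward pass: later[i] = whether any relation label occurs after index i
--         later = [False] * n
--         seen = False
--         for i in range(n - 1, -1, -1):
--             later[i] = seen
--             if sentence[i] in rel:
--                 seen = True
--         # forward pass over all but the last label (A never touches the last one)
--         new = []
--         started = False
--         for lab, lat in zip(sentence[:n - 1], later):
--             if lab in rel:
--                 if started:
--                     new.append('R-I' if lat else 'R-E')
--                 else: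
--                     new.append('R-B' if lat else 'R-S')
--                     started = True
--             else:
--                 new.append(lab)
--         new += sentence[n - 1:]
--         out.append([new] + line[1:])
--     return out
-- ===== Notes on version B (the rewrite author's own statement) =====
-- stated objective: alternative
-- what changed: B replaces A's per-position rescans of the whole suffix for a remaining relation label by one backward pass that precomputes suffix-existence, then one forward pass with the started flag, building a fresh output list instead of mutating in place.
-- outside the precondition, e.g. on clean_predictions([[]]): A raises IndexError, B raises IndexError
import Mathlib
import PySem

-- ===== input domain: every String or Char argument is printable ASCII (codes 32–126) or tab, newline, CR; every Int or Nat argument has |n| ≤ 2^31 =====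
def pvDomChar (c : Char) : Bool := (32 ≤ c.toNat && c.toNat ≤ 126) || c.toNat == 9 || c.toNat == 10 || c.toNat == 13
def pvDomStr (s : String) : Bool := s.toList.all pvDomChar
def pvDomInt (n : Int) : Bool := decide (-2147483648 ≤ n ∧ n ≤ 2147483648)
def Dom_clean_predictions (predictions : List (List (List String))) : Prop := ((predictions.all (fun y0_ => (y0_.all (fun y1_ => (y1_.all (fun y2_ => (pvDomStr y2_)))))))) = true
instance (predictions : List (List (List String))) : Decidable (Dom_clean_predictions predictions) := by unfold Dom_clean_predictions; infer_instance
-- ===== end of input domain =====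

-- B replaces A's per-position rescans of the suffix by one backward pass precomputing suffix-existence;
-- A also mutates `predictions` in place, B builds a fresh list — the equivalence proved is about the return value.

-- ===== PORT A =====
def relLabels : List String := ["R-B", "R-E", "R-I", "R-S"]

-- for upcoming_label in sentence[label_index+1:]: if … : flag = True
def upcomingScan (suffix : List String) : Bool :=
  suffix.foldl (fun acc l => if relLabels.contains l then true else acc) false

-- one iteration of A's inner loop: state = (sentence being mutated, relation_started_flag)
def stepA (st : List String × Bool) (i : Nat) : List String × Bool :=
  let s := st.1
  let flag := st.2
  let cur := s.getD i ""   -- sentence[label_index]; i ∈ range(len-1) is always in range, default unreachable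
  if relLabels.contains cur then
    let upcoming := upcomingScan (s.drop (i+1))   -- sentence[label_index+1:] (nonneg slice = drop)
    if flag then
      (s.set i (if upcoming then "R-I" else "R-E"), flag)
    else
      (s.set i (if upcoming then "R-B" else "R-S"), true)
  else
    (s.set i cur, flag)   -- predictions[line_index][0][label_index] = cur_label (unchanged here)

-- A's inner loop over label_index in range(0, len(sentence) - 1)
def cleanSentA (sentence : List String) : List String :=
  ((List.range (sentence.length - 1)).foldl stepA (sentence, false)).1

def clean_predictions (predictions : List (List (List String))) : List (List (List String)) :=
  -- the outer index loop mutates predictions[line_index] in place = map over the lines;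
  -- predictions[line_index][0] raises IndexError on an empty line (excluded by Pre_); getD [] is unreachable inside Pre_
  predictions.map (fun line =>
    line.set 0 (cleanSentA ((PySem.List.pyGet? line 0).getD [])))

-- ===== PORT B =====
-- backward pass: (later list, seen) — later[i] = some relation label occurs after index i
def laterPass (sentence : List String) : List Bool × Bool :=
  sentence.foldr (fun l (st : List Bool × Bool) =>
    (st.2 :: st.1, st.2 || relLabels.contains l)) ([], false)

-- forward pass over zip(sentence[:n-1], later) carrying the `started` flag
def fwd : List (String × Bool) → Bool → List String
  | [], _ => []
  | (l, lat) :: rest, started =>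
    if relLabels.contains l then
      (if started then (if lat then "R-I" else "R-E")
       else (if lat then "R-B" else "R-S")) :: fwd rest true
    else
      l :: fwd rest started

def cleanSentB (sentence : List String) : List String :=
  fwd ((sentence.take (sentence.length - 1)).zip (laterPass sentence).1) false
    ++ sentence.drop (sentence.length - 1)

def clean_predictions_alt (predictions : List (List (List String))) : List (List (List String)) :=
  predictions.map (fun line =>
    [cleanSentB ((PySem.List.pyGet? line 0).getD [])] ++ line.drop 1)

-- ===== PRECONDITION & SPEC =====
-- Pre_ excludes exactly the inputs with an empty line, on which Python A raises IndexError at predictions[line_index][0].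
def Pre_clean_predictions (predictions : List (List (List String))) : Prop :=
  ∀ line ∈ predictions, line ≠ []
instance (predictions : List (List (List String))) : Decidable (Pre_clean_predictions predictions) := by unfold Pre_clean_predictions; infer_instance

def pvWitness_clean_predictions : List (List (List String)) :=
  [[["R-B", "O", "R-S", "X"]], [["O"], ["extra"]]]

def Spec_clean_predictions (predictions : List (List (List String))) (out : List (List (List String))) : Prop := out = clean_predictions_alt predictions
instance (predictions : List (List (List String))) (out : List (List (List String))) : Decidable (Spec_clean_predictions predictions out) := by unfold Spec_clean_predictions; infer_instance

-- ===== CLAIM (what is proved, stated in full; the proofs are below) =====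
def Claim_equal_clean_predictions : Prop := ∀ (predictions : List (List (List String))), Dom_clean_predictions predictions → Pre_clean_predictions predictions → Spec_clean_predictions predictions (clean_predictions predictions)

-- ===== LEMMAS AND PROOFS =====

-- shifting all indices up by one acts only on the tail of the sentence state
theorem stepA_shift (y : String) (s : List String) (flag : Bool) (i : Nat) :
    stepA (y :: s, flag) (i + 1) = ((stepA (s, flag) i).1.cons y, (stepA (s, flag) i).2) := by
  simp only [stepA, List.getD_cons_succ, List.drop_succ_cons, List.set_cons_succ]
  split_ifs <;> simp

theorem foldl_stepA_shift (idxs : List Nat) (y : String) (s : List String) (flag : Bool) :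
    idxs.foldl (fun st i => stepA st (i + 1)) (y :: s, flag)
      = ((idxs.foldl stepA (s, flag)).1.cons y, (idxs.foldl stepA (s, flag)).2) := by
  induction idxs generalizing s flag with
  | nil => rfl
  | cons i rest ih =>
    simp only [List.foldl_cons, stepA_shift]
    exact ih _ _

theorem upcomingScan_acc (xs : List String) (acc : Bool) :
    xs.foldl (fun acc l => if relLabels.contains l then true else acc) acc
      = (acc || xs.any (fun l => relLabels.contains l)) := by
  induction xs generalizing acc with
  | nil => simp
  | cons x xs ih =>
    simp only [List.foldl_cons, List.any_cons, ih]
    cases acc <;> cases hx : decide (x ∈ relLabels) <;> simp_all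

theorem upcomingScan_eq_any (xs : List String) :
    upcomingScan xs = xs.any (fun l => relLabels.contains l) := by
  unfold upcomingScan
  rw [upcomingScan_acc]
  simp

theorem laterPass_cons (x : String) (xs : List String) :
    laterPass (x :: xs)
      = ((laterPass xs).2 :: (laterPass xs).1, (laterPass xs).2 || relLabels.contains x) := by
  rfl

theorem laterPass_snd (xs : List String) :
    (laterPass xs).2 = xs.any (fun l => relLabels.contains l) := by
  induction xs with
  | nil => rfl
  | cons x xs ih =>
    rw [laterPass_cons]
    simp [ih, List.any_cons, Bool.or_comm]

-- main lemma: A's index loop with in-place sets equals B's two passes, for any initial flag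
theorem cleanSent_core (sentence : List String) (flag : Bool) :
    ((List.range (sentence.length - 1)).foldl stepA (sentence, flag)).1
      = fwd ((sentence.take (sentence.length - 1)).zip (laterPass sentence).1) flag
          ++ sentence.drop (sentence.length - 1) := by
  induction sentence generalizing flag with
  | nil => rfl
  | cons x xs ih =>
    cases xs with
    | nil => cases flag <;> rfl
    | cons y ys =>
      have hlen : (x :: y :: ys).length - 1 = (y :: ys).length - 1 + 1 := by
        simp [List.length_cons]
      rw [hlen, List.range_succ_eq_map, List.foldl_cons, List.foldl_map]
      have hstep0 : stepA (x :: y :: ys, flag) 0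
          = ((if relLabels.contains x then
                (if flag then (if upcomingScan (y :: ys) then "R-I" else "R-E")
                 else (if upcomingScan (y :: ys) then "R-B" else "R-S"))
              else x) :: y :: ys,
             if relLabels.contains x then true else flag) := by
        simp only [stepA, List.getD_cons_zero, List.drop_succ_cons, List.drop_zero,
          List.set_cons_zero]
        split_ifs <;> simp_all
      rw [hstep0, foldl_stepA_shift, ih]
      -- now compute the RHS for x :: y :: ys
      rw [laterPass_cons x (y :: ys), List.take_succ_cons, List.drop_succ_cons]
      by_cases hx : x ∈ relLabels
      · simp [fwd, hx, List.zip_cons_cons, laterPass_snd, upcomingScan_eq_any]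
      · simp [fwd, hx, List.zip_cons_cons]

theorem cleanSent_eq (sentence : List String) :
    cleanSentA sentence = cleanSentB sentence := by
  simpa [cleanSentA, cleanSentB] using cleanSent_core sentence false

-- ===== VERDICT (by name: the statement is the Claim_ definition above) =====
theorem clean_predictions_spec : Claim_equal_clean_predictions := by
  intro predictions _hdom hpre
  unfold Spec_clean_predictions clean_predictions clean_predictions_alt
  refine List.map_congr_left ?_
  intro line hline
  have hne := hpre line hline
  cases line with
  | nil => exact absurd rfl hne
  | cons s rest =>
    simp [PySem.List.pyGet?, PySem.List.pyIdx?, cleanSent_eq]
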